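-- pv_equiv track=rewrite | github.com/rokkovach/index_numerorum | src/index_numerorum/store.py | _compute_groups
-- ===== SOURCE A (Python) =====
-- def _compute_groups(pairs: list[tuple[str, str]]) -> dict[str, int]:
--     parent: dict[str, str] = {}
--
--     def find(x: str) -> str:
--         if x not in parent:
--             parent[x] = x
--         while parent[x] != x:
--             parent[x] = parent[parent[x]]
--             x = parent[x]
--         return x
--
--     def union(a: str, b: str) -> None:
--         ra, rb = find(a), find(b)
--         if ra != rb:
--             parent[ra] = rb
--
--     for a, b in pairs:
--         union(a, b)
--
--     roots: dict[str, int] = {}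
--     counter = 1
--     result: dict[str, int] = {}
--     for a, b in pairs:
--         for k in (a, b):
--             if k not in result:
--                 root = find(k)
--                 if root not in roots:
--                     roots[root] = counter
--                     counter += 1
--                 result[k] = roots[root]
--     return result
-- ===== SOURCE B (Python) =====
-- def _compute_groups(pairs: list[tuple[str, str]]) -> dict[str, int]:
--     # Connected components by eager label merging (no union-find forest):
--     # every node carries an int label; joining two labelled components
--     # rewrites one label into the other in a single dict rebuild.
--     comp: dict[str, int] = {}
--     next_label = 0
--     for a, b in pairs:
--         la = comp.get(a)
--         lb = comp.get(b)
--         if la is None and lb is None: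
--             comp[a] = next_label
--             comp[b] = next_label
--             next_label += 1
--         elif la is None:
--             comp[a] = lb
--         elif lb is None:
--             comp[b] = la
--         elif la != lb:
--             comp = {k: (la if v == lb else v) for k, v in comp.items()}
--     result: dict[str, int] = {}
--     groups: dict[int, int] = {}
--     counter = 1
--     for k in (x for ab in pairs for x in ab):
--         if k not in result:
--             lab = comp[k]
--             if lab not in groups:
--                 groups[lab] = counter
--                 counter += 1
--             result[k] = groups[lab]
--     return result
-- ===== Notes on version B (the rewrite author's own statement) =====
-- stated objective: alternative
-- what changed: Replaces A's path-halving union-find (mutable parent forest with find/union and path compression) by eager label merging: every node carries an int component label in a dict and joining two labelled components rewrites one label into the other in a single dict rebuild; the final numbering pass walks the same flattened first-appearance order.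
import Mathlib
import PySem

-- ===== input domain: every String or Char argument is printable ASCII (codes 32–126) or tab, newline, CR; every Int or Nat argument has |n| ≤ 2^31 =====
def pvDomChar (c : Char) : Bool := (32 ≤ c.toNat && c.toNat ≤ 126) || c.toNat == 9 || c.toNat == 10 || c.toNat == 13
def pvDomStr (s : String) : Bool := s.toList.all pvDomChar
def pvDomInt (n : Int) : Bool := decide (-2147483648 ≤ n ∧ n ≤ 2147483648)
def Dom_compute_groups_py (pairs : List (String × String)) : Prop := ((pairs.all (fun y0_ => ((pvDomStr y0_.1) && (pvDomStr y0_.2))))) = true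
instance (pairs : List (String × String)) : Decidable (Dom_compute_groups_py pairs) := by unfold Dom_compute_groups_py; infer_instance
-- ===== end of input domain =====

-- B replaces A's path-halving union-find by eager label merging (every node carries an
-- int component label; a join rewrites one label into the other in one dict rebuild):
-- a genuinely different algorithm of similar cost ('alternative', no speed claim).

-- ===== PORT A =====
-- parent[x] (in A this is only ever read at keys of parent, where it is exact)
def ufStep (p : PySem.Dict String String) (x : String) : String := p.getD x x

-- 'while parent[x] != x: parent[x] = parent[parent[x]]; x = parent[x]' — fuel makes the
-- loop total; fuel = size of parent is proved sufficient below (the loop halves the path).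
def findLoop : Nat → PySem.Dict String String → String → String × PySem.Dict String String
  | 0, p, x => (x, p)
  | fuel+1, p, x =>
    if ufStep p x ≠ x then
      findLoop fuel (p.insert x (ufStep p (ufStep p x))) (ufStep p (ufStep p x))
    else (x, p)

def ufFind (p : PySem.Dict String String) (x : String) : String × PySem.Dict String String :=
  let p1 := if p.contains x then p else p.insert x x
  findLoop p1.size p1 x

def ufUnion (p : PySem.Dict String String) (a b : String) : PySem.Dict String String :=
  let fa := ufFind p a
  let fb := ufFind fa.2 b
  if fa.1 ≠ fb.1 then fb.2.insert fa.1 fb.1 else fb.2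

-- one iteration of the inner 'for k in (a, b)' body of A's labelling loop
def phase2A (st : PySem.Dict String String × PySem.Dict String Int × Int × PySem.Dict String Int)
    (k : String) : PySem.Dict String String × PySem.Dict String Int × Int × PySem.Dict String Int :=
  if st.2.2.2.contains k then st
  else
    let f := ufFind st.1 k
    let rc := if st.2.1.contains f.1 then (st.2.1, st.2.2.1)
              else (st.2.1.insert f.1 st.2.2.1, st.2.2.1 + 1)
    (f.2, rc.1, rc.2, st.2.2.2.insert k (rc.1.getD f.1 0))

def compute_groups_py (pairs : List (String × String)) : List (String × Int) :=
  let p := pairs.foldl (fun p ab => ufUnion p ab.1 ab.2) PySem.Dict.empty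
  (pairs.foldl (fun st ab => phase2A (phase2A st ab.1) ab.2)
    (p, PySem.Dict.empty, 1, PySem.Dict.empty)).2.2.2.items

-- ===== PORT B =====
-- '{k: (la if v == lb else v) for k, v in comp.items()}'
def mergeLabels (comp : PySem.Dict String Int) (la lb : Int) : PySem.Dict String Int :=
  PySem.Dict.mk (comp.items.map (fun kv => (kv.1, if kv.2 == lb then la else kv.2)))

def addPairB (st : PySem.Dict String Int × Int) (ab : String × String) : PySem.Dict String Int × Int :=
  match st.1.get? ab.1, st.1.get? ab.2 with
  | none, none => ((st.1.insert ab.1 st.2).insert ab.2 st.2, st.2 + 1)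
  | none, some lb => (st.1.insert ab.1 lb, st.2)
  | some la, none => (st.1.insert ab.2 la, st.2)
  | some la, some lb => (if la ≠ lb then mergeLabels st.1 la lb else st.1, st.2)

-- one iteration of B's labelling loop over the flattened node order
def phase2B (comp : PySem.Dict String Int)
    (st : PySem.Dict Int Int × Int × PySem.Dict String Int) (k : String) :
    PySem.Dict Int Int × Int × PySem.Dict String Int :=
  if st.2.2.contains k then st
  else
    let lab := comp.getD k 0
    let gc := if st.1.contains lab then (st.1, st.2.1)
              else (st.1.insert lab st.2.1, st.2.1 + 1)
    (gc.1, gc.2, st.2.2.insert k (gc.1.getD lab 0))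

def compute_groups_py_alt (pairs : List (String × String)) : List (String × Int) :=
  let comp := (pairs.foldl addPairB (PySem.Dict.empty, 0)).1
  let order := pairs.flatMap (fun ab => [ab.1, ab.2])
  (order.foldl (phase2B comp) (PySem.Dict.empty, 1, PySem.Dict.empty)).2.2.items

-- ===== PRECONDITION & SPEC =====
def Spec_compute_groups_py (pairs : List (String × String)) (out : List (String × Int)) : Prop := out = compute_groups_py_alt pairs
instance (pairs : List (String × String)) (out : List (String × Int)) : Decidable (Spec_compute_groups_py pairs out) := by unfold Spec_compute_groups_py; infer_instance

-- ===== CLAIM (what is proved, stated in full; the proofs are below) =====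
def Claim_equal_compute_groups_py : Prop := ∀ (pairs : List (String × String)), Dom_compute_groups_py pairs → Spec_compute_groups_py pairs (compute_groups_py pairs)

-- ===== LEMMAS AND PROOFS =====

-- ---- the parent forest of A, abstractly ----
def piter (p : PySem.Dict String String) : Nat → String → String
  | 0, x => x
  | n+1, x => piter p n (ufStep p x)

def IsRoot (p : PySem.Dict String String) (x : String) : Prop := ufStep p x = x

def RootsTo (p : PySem.Dict String String) (x r : String) : Prop :=
  ∃ n, piter p n x = r ∧ IsRoot p r

def UFClosed (p : PySem.Dict String String) : Prop :=
  ∀ kv ∈ p.items, p.contains kv.2 = true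

def UFInv (p : PySem.Dict String String) : Prop :=
  p.keys.Nodup ∧ UFClosed p ∧ ∀ x, ∃ r, RootsTo p x r

def sameRoot (p : PySem.Dict String String) (x y : String) : Prop :=
  ∃ r, RootsTo p x r ∧ RootsTo p y r

-- ---- basic piter facts ----
theorem piter_add (p : PySem.Dict String String) (m n : Nat) (x : String) :
    piter p (m + n) x = piter p n (piter p m x) := by
  induction m generalizing x with
  | zero => simp [piter]
  | succ k ih => simpa [piter, Nat.succ_add] using ih (ufStep p x)

theorem root_piter (p : PySem.Dict String String) {r : String} (h : IsRoot p r) (n : Nat) :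
    piter p n r = r := by
  induction n with
  | zero => rfl
  | succ k ih => unfold IsRoot at h; simp [piter, h, ih]

theorem piter_succ_right (p : PySem.Dict String String) (n : Nat) (x : String) :
    piter p (n + 1) x = ufStep p (piter p n x) := by
  simpa [piter] using piter_add p n 1 x

theorem rootsTo_unique {p : PySem.Dict String String} {x r r' : String}
    (h : RootsTo p x r) (h' : RootsTo p x r') : r = r' := by
  obtain ⟨n, hn, hr⟩ := h
  obtain ⟨m, hm, hr'⟩ := h'
  rcases Nat.le_total n m with hle | hle
  · have e := piter_add p n (m - n) x
    rw [Nat.add_sub_cancel' hle, hm, hn, root_piter p hr] at e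
    exact e.symm
  · have e := piter_add p m (n - m) x
    rw [Nat.add_sub_cancel' hle, hn, hm, root_piter p hr'] at e
    exact e

theorem rootsTo_of_step {p : PySem.Dict String String} {x r : String}
    (h : RootsTo p (ufStep p x) r) : RootsTo p x r := by
  obtain ⟨n, hn, hr⟩ := h
  exact ⟨n + 1, by simpa [piter] using hn, hr⟩

theorem contains_of_not_root {p : PySem.Dict String String} {x : String}
    (h : ufStep p x ≠ x) : p.contains x = true := by
  cases hc : p.contains x with
  | true => rfl
  | false => exact absurd (PySem.Dict.getD_of_not_contains p x hc) h

theorem closed_step_contains {p : PySem.Dict String String} (hc : UFClosed p) {x : String}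
    (h : p.contains x = true) : p.contains (ufStep p x) = true := by
  have hs : (p.get? x).isSome := by rw [← PySem.Dict.contains_eq_isSome_get?]; exact h
  obtain ⟨v, hv⟩ := Option.isSome_iff_exists.mp hs
  have : ufStep p x = v := PySem.Dict.getD_of_get?_eq_some p x hv
  rw [this]
  exact hc (x, v) (PySem.Dict.mem_items_of_get?_eq_some p hv)

theorem contains_piter {p : PySem.Dict String String} (hc : UFClosed p) {x : String}
    (h : p.contains x = true) (n : Nat) : p.contains (piter p n x) = true := by
  induction n generalizing x with
  | zero => exact h
  | succ k ih => exact by simpa [piter] using ih (closed_step_contains hc h)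

theorem keys_length_eq_size (p : PySem.Dict String String) : p.keys.length = p.size := by
  simp [PySem.Dict.keys, PySem.Dict.size]

theorem exists_root_le_size {p : PySem.Dict String String} (hInv : UFInv p) (x : String) :
    ∃ n ≤ p.size, IsRoot p (piter p n x) := by
  obtain ⟨hnd, hcl, hac⟩ := hInv
  obtain ⟨r, n0, hn0, hr0⟩ := hac x
  have hex : ∃ n, IsRoot p (piter p n x) := ⟨n0, hn0 ▸ hr0⟩
  classical
  refine ⟨Nat.find hex, ?_, Nat.find_spec hex⟩
  set d := Nat.find hex with hd
  have hmin : ∀ m < d, ¬ IsRoot p (piter p m x) := fun m hm => Nat.find_min hex hm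
  rcases Nat.eq_zero_or_pos d with h0 | hpos
  · omega
  have hinj : ∀ i < d, ∀ j < d, piter p i x = piter p j x → i = j := by
    have key : ∀ i j, i < j → j < d → piter p i x = piter p j x → False := by
      intro i j hij hjd he
      have per : piter p (i + (d - j)) x = piter p (j + (d - j)) x := by
        rw [piter_add, piter_add, he]
      rw [Nat.add_sub_cancel' (Nat.le_of_lt hjd)] at per
      exact hmin (i + (d - j)) (by omega) (per ▸ Nat.find_spec hex)
    intro i hi j hj he
    rcases Nat.lt_trichotomy i j with h | h | h
    · exact absurd (key i j h hj he) id
    · exact h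
    · exact absurd (key j i h hi he.symm) id
  have hmem : ∀ i < d, piter p i x ∈ p.keys := by
    intro i hi
    exact (PySem.Dict.contains_iff_mem_keys p _).mp
      (contains_of_not_root (hmin i hi))
  have hnodup : ((List.range d).map (fun i => piter p i x)).Nodup := by
    refine (List.nodup_range).map_on ?_
    intro i hi j hj he
    exact hinj i (List.mem_range.mp hi) j (List.mem_range.mp hj) he
  have hsub : ∀ z ∈ (List.range d).map (fun i => piter p i x), z ∈ p.keys := by
    intro z hz
    obtain ⟨i, hi, rfl⟩ := List.mem_map.mp hz
    exact hmem i (List.mem_range.mp hi)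
  have hlen : ((List.range d).map (fun i => piter p i x)).length ≤ p.keys.length := by
    set l := (List.range d).map (fun i => piter p i x)
    calc l.length = l.toFinset.card := (List.toFinset_card_of_nodup hnodup).symm
      _ ≤ p.keys.toFinset.card := Finset.card_le_card (by
            intro z hz; rw [List.mem_toFinset] at hz ⊢; exact hsub z hz)
      _ ≤ p.keys.length := p.keys.toFinset_card_le
  simpa [keys_length_eq_size] using hlen

theorem ufStep_insert (p : PySem.Dict String String) (k v x : String) :
    ufStep (p.insert k v) x = if x = k then v else ufStep p x := by
  unfold ufStep
  rw [PySem.Dict.getD_insert]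

-- ---- fresh self-insert: parent unchanged as a function ----
theorem ufStep_insert_self {p : PySem.Dict String String} {x : String}
    (h : p.contains x = false) : ∀ y, ufStep (p.insert x x) y = ufStep p y := by
  intro y
  rw [ufStep_insert]
  split
  · next he => subst he; exact (PySem.Dict.getD_of_not_contains p y h).symm
  · rfl

theorem piter_congr {p q : PySem.Dict String String}
    (h : ∀ y, ufStep p y = ufStep q y) : ∀ n y, piter p n y = piter q n y := by
  intro n
  induction n with
  | zero => intro y; rfl
  | succ k ih => intro y; simp only [piter, h y]; exact ih _

theorem rootsTo_congr {p q : PySem.Dict String String}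
    (h : ∀ y, ufStep p y = ufStep q y) (y r : String) : RootsTo p y r ↔ RootsTo q y r := by
  unfold RootsTo IsRoot
  constructor
  · rintro ⟨n, hn, hr⟩
    exact ⟨n, by rw [← piter_congr h]; exact hn, by rw [← h]; exact hr⟩
  · rintro ⟨n, hn, hr⟩
    exact ⟨n, by rw [piter_congr h]; exact hn, by rw [h]; exact hr⟩

theorem rootsTo_insert_self {p : PySem.Dict String String} {x : String}
    (h : p.contains x = false) (y r : String) :
    RootsTo (p.insert x x) y r ↔ RootsTo p y r :=
  rootsTo_congr (ufStep_insert_self h) y r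

theorem inv_insert_self {p : PySem.Dict String String} {x : String}
    (hInv : UFInv p) (h : p.contains x = false) : UFInv (p.insert x x) := by
  obtain ⟨hnd, hcl, hac⟩ := hInv
  refine ⟨PySem.Dict.nodup_keys_insert p x x hnd, ?_, ?_⟩
  · intro kv hkv
    rw [PySem.Dict.mem_items_insert] at hkv
    rw [PySem.Dict.contains_insert]
    rcases hkv with rfl | ⟨hkv, _⟩
    · simp
    · rw [hcl kv hkv]; simp
  · intro y
    obtain ⟨r, hr⟩ := hac y
    exact ⟨r, (rootsTo_insert_self h y r).mpr hr⟩

-- ---- path halving step ----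
theorem halve_g_ne {p : PySem.Dict String String} {x : String}
    (hInv : UFInv p) (hx : ufStep p x ≠ x) : ufStep p (ufStep p x) ≠ x := by
  intro hg
  have claim : ∀ m, piter p m x = x ∨ piter p m x = ufStep p x := by
    intro m
    induction m with
    | zero => left; rfl
    | succ k ih =>
      rw [piter_succ_right]
      rcases ih with h | h
      · right; rw [h]
      · left; rw [h, hg]
  obtain ⟨r, n, hn, hr⟩ := hInv.2.2 x
  rcases claim n with h | h
  · rw [hn] at h; subst h; exact hx hr
  · rw [hn] at h; subst h
    unfold IsRoot at hr
    rw [hg] at hr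
    exact hx hr.symm

theorem halve_fwd {p : PySem.Dict String String} {x : String}
    (hInv : UFInv p) (hx : ufStep p x ≠ x) :
    ∀ n y r, piter p n y = r → IsRoot p r →
      ∃ m ≤ n, piter (p.insert x (ufStep p (ufStep p x))) m y = r ∧
        IsRoot (p.insert x (ufStep p (ufStep p x))) r := by
  intro n
  induction n using Nat.strong_induction_on with
  | _ n IH =>
    intro y r hpit hr
    have hrx : r ≠ x := fun h => hx (h ▸ hr)
    have hroot' : IsRoot (p.insert x (ufStep p (ufStep p x))) r := by
      unfold IsRoot
      rw [ufStep_insert]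
      simpa [hrx] using hr
    cases n with
    | zero =>
      simp only [piter] at hpit
      exact ⟨0, Nat.le_refl 0, by simpa [piter] using hpit, hroot'⟩
    | succ k =>
      by_cases hy : IsRoot p y
      · rw [root_piter p hy] at hpit
        subst hpit
        exact ⟨0, Nat.zero_le _, rfl, hroot'⟩
      · simp only [piter] at hpit
        by_cases hyx : y = x
        · subst hyx
          by_cases hsr : IsRoot p (ufStep p y)
          · rw [root_piter p hsr] at hpit
            subst hpit
            refine ⟨1, by omega, ?_, hroot'⟩
            unfold IsRoot at hsr
            simp only [piter, ufStep_insert, if_pos rfl]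
            exact hsr
          · cases k with
            | zero =>
              simp only [piter] at hpit
              exact absurd (hpit ▸ hr) hsr
            | succ k' =>
              simp only [piter] at hpit
              obtain ⟨m, hm, hmp, hmr⟩ := IH k' (by omega) (ufStep p (ufStep p y)) r hpit hr
              refine ⟨m + 1, by omega, ?_, hmr⟩
              simp only [piter, ufStep_insert, if_pos rfl]
              exact hmp
        · obtain ⟨m, hm, hmp, hmr⟩ := IH k (by omega) (ufStep p y) r hpit hr
          refine ⟨m + 1, by omega, ?_, hmr⟩
          simp only [piter, ufStep_insert, if_neg hyx]
          exact hmp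

theorem halve_bwd {p : PySem.Dict String String} {x : String}
    (hInv : UFInv p) (hx : ufStep p x ≠ x) :
    ∀ y r, RootsTo (p.insert x (ufStep p (ufStep p x))) y r → RootsTo p y r := by
  have hgne := halve_g_ne hInv hx
  have hroot_bwd : ∀ r, IsRoot (p.insert x (ufStep p (ufStep p x))) r → IsRoot p r := by
    intro r hr
    unfold IsRoot at hr ⊢
    rw [ufStep_insert] at hr
    by_cases hrx : r = x
    · subst hrx; simp at hr; exact absurd hr hgne
    · simpa [hrx] using hr
  intro y r ⟨n, hn, hr⟩
  have hrp : IsRoot p r := hroot_bwd r hr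
  induction n generalizing y with
  | zero =>
    simp only [piter] at hn
    exact ⟨0, by simpa [piter] using hn, hrp⟩
  | succ k ih =>
    simp only [piter] at hn
    by_cases hyx : y = x
    · subst hyx
      rw [ufStep_insert] at hn
      simp at hn
      have : RootsTo p (ufStep p (ufStep p y)) r := ih _ hn
      exact rootsTo_of_step (rootsTo_of_step this)
    · rw [ufStep_insert] at hn
      simp only [hyx, if_false] at hn
      exact rootsTo_of_step (ih _ hn)

theorem halve_inv {p : PySem.Dict String String} {x : String}
    (hInv : UFInv p) (hx : ufStep p x ≠ x) :
    UFInv (p.insert x (ufStep p (ufStep p x))) := by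
  obtain ⟨hnd, hcl, hac⟩ := hInv
  have hcx : p.contains x = true := contains_of_not_root hx
  refine ⟨PySem.Dict.nodup_keys_insert p _ _ hnd, ?_, ?_⟩
  · intro kv hkv
    rw [PySem.Dict.mem_items_insert] at hkv
    rw [PySem.Dict.contains_insert]
    rcases hkv with rfl | ⟨hkv, _⟩
    · rw [closed_step_contains hcl (closed_step_contains hcl hcx)]; simp
    · rw [hcl kv hkv]; simp
  · intro y
    obtain ⟨r, n, hn, hr⟩ := hac y
    obtain ⟨m, _, hmp, hmr⟩ := halve_fwd ⟨hnd, hcl, hac⟩ hx n y r hn hr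
    exact ⟨r, m, hmp, hmr⟩

-- ---- the union insert parent[ra] = rb ----
theorem union_fwd1 {p : PySem.Dict String String} {ra rb : String}
    (hra : IsRoot p ra) (hrb : IsRoot p rb) (hne : ra ≠ rb) :
    ∀ y r, RootsTo p y r → r ≠ ra → RootsTo (p.insert ra rb) y r := by
  intro y r ⟨n, hn, hr⟩ hrne
  have hroot' : IsRoot (p.insert ra rb) r := by
    unfold IsRoot
    rw [ufStep_insert]
    simpa [hrne] using hr
  induction n generalizing y with
  | zero =>
    simp only [piter] at hn
    exact ⟨0, by simpa [piter] using hn, hroot'⟩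
  | succ k ih =>
    simp only [piter] at hn
    by_cases hy : IsRoot p y
    · have : ufStep p y = y := hy
      rw [this, root_piter p hy] at hn
      subst hn
      exact ⟨0, rfl, hroot'⟩
    · have hyra : y ≠ ra := fun h => hy (h ▸ hra)
      obtain ⟨m, hm, hmr⟩ := ih _ hn
      exact ⟨m + 1, by simp only [piter, ufStep_insert, if_neg hyra]; exact hm, hmr⟩

theorem union_fwd2 {p : PySem.Dict String String} {ra rb : String}
    (hra : IsRoot p ra) (hrb : IsRoot p rb) (hne : ra ≠ rb) :
    ∀ y, RootsTo p y ra → RootsTo (p.insert ra rb) y rb := by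
  have hrb' : IsRoot (p.insert ra rb) rb := by
    unfold IsRoot
    rw [ufStep_insert]
    simpa [(Ne.symm hne)] using hrb
  intro y ⟨n, hn, _⟩
  induction n generalizing y with
  | zero =>
    simp only [piter] at hn
    subst hn
    exact ⟨1, by simp [piter, ufStep_insert], hrb'⟩
  | succ k ih =>
    simp only [piter] at hn
    by_cases hy : IsRoot p y
    · have he : ufStep p y = y := hy
      rw [he, root_piter p hy] at hn
      subst hn
      exact ⟨1, by simp [piter, ufStep_insert], hrb'⟩
    · have hyra : y ≠ ra := fun h => hy (h ▸ hra)
      obtain ⟨m, hm, hmr⟩ := ih _ hn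
      exact ⟨m + 1, by simp only [piter, ufStep_insert, if_neg hyra]; exact hm, hmr⟩

theorem union_bwd {p : PySem.Dict String String} {ra rb : String}
    (hra : IsRoot p ra) (hrb : IsRoot p rb) (hne : ra ≠ rb) :
    ∀ y r, RootsTo (p.insert ra rb) y r →
      (RootsTo p y r ∧ r ≠ ra) ∨ (RootsTo p y ra ∧ r = rb) := by
  have hraN : ¬ IsRoot (p.insert ra rb) ra := by
    unfold IsRoot
    rw [ufStep_insert, if_pos rfl]
    exact Ne.symm hne
  have hroot_bwd : ∀ r, IsRoot (p.insert ra rb) r → IsRoot p r ∧ r ≠ ra := by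
    intro r hr
    have hrne : r ≠ ra := fun h => hraN (h ▸ hr)
    unfold IsRoot at hr ⊢
    rw [ufStep_insert, if_neg hrne] at hr
    exact ⟨hr, hrne⟩
  intro y r ⟨n, hn, hr⟩
  induction n generalizing y with
  | zero =>
    simp only [piter] at hn
    subst hn
    exact Or.inl ⟨⟨0, rfl, (hroot_bwd y hr).1⟩, (hroot_bwd y hr).2⟩
  | succ k ih =>
    simp only [piter] at hn
    by_cases hyra : y = ra
    · subst hyra
      rw [ufStep_insert, if_pos rfl] at hn
      have : piter (p.insert y rb) k rb = rb := root_piter _ (by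
        unfold IsRoot; rw [ufStep_insert, if_neg (Ne.symm hne)]; exact hrb) k
      rw [this] at hn
      subst hn
      exact Or.inr ⟨⟨0, rfl, hra⟩, rfl⟩
    · rw [ufStep_insert, if_neg hyra] at hn
      rcases ih _ hn with ⟨h1, h2⟩ | ⟨h1, h2⟩
      · exact Or.inl ⟨rootsTo_of_step h1, h2⟩
      · exact Or.inr ⟨rootsTo_of_step h1, h2⟩

theorem union_inv {p : PySem.Dict String String} {ra rb : String}
    (hInv : UFInv p) (hra : IsRoot p ra) (hrb : IsRoot p rb) (hne : ra ≠ rb)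
    (hrak : p.contains ra = true) (hrbk : p.contains rb = true) :
    UFInv (p.insert ra rb) := by
  obtain ⟨hnd, hcl, hac⟩ := hInv
  refine ⟨PySem.Dict.nodup_keys_insert p _ _ hnd, ?_, ?_⟩
  · intro kv hkv
    rw [PySem.Dict.mem_items_insert] at hkv
    rw [PySem.Dict.contains_insert]
    rcases hkv with rfl | ⟨hkv, _⟩
    · rw [hrbk]; simp
    · rw [hcl kv hkv]; simp
  · intro y
    obtain ⟨r, hr⟩ := hac y
    by_cases hrra : r = ra
    · exact ⟨rb, union_fwd2 hra hrb hne y (hrra ▸ hr)⟩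
    · exact ⟨r, union_fwd1 hra hrb hne y r hr hrra⟩

-- ---- findLoop / ufFind / ufUnion specs ----
theorem findLoop_spec : ∀ (fuel : Nat) (p : PySem.Dict String String) (x : String),
    UFInv p → (∃ n ≤ fuel, IsRoot p (piter p n x)) →
    UFInv (findLoop fuel p x).2 ∧
    RootsTo p x (findLoop fuel p x).1 ∧
    (∀ y r, RootsTo p y r ↔ RootsTo (findLoop fuel p x).2 y r) ∧
    (findLoop fuel p x).2.keys = p.keys := by
  intro fuel
  induction fuel with
  | zero =>
    rintro p x hInv ⟨n, hn, hr⟩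
    have hn0 : n = 0 := Nat.le_zero.mp hn
    subst hn0
    simp only [piter] at hr
    simp only [findLoop]
    exact ⟨hInv, ⟨0, rfl, hr⟩, fun _ _ => trivial, trivial⟩
  | succ fuel ih =>
    rintro p x hInv ⟨n, hnle, hr⟩
    by_cases hx : ufStep p x = x
    · simp only [findLoop, ne_eq, hx, not_true_eq_false, if_false]
      exact ⟨hInv, ⟨0, rfl, hx⟩, fun _ _ => trivial, trivial⟩
    · have hred : findLoop (fuel+1) p x =
          findLoop fuel (p.insert x (ufStep p (ufStep p x))) (ufStep p (ufStep p x)) := by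
        simp only [findLoop, ne_eq, hx, not_false_eq_true, if_true]
      obtain ⟨m, hm, hmp, hmr⟩ := halve_fwd hInv hx n x _ rfl hr
      have hgx : ufStep p (ufStep p x) ≠ x := halve_g_ne hInv hx
      have hstep' : ufStep (p.insert x (ufStep p (ufStep p x))) x = ufStep p (ufStep p x) := by
        rw [ufStep_insert, if_pos rfl]
      cases m with
      | zero =>
        exfalso
        simp only [piter] at hmp
        rw [← hmp] at hmr
        unfold IsRoot at hmr
        rw [hstep'] at hmr
        exact hgx hmr
      | succ m' =>
        simp only [piter, hstep'] at hmp
        have hwit : ∃ k ≤ fuel, IsRoot (p.insert x (ufStep p (ufStep p x)))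
            (piter (p.insert x (ufStep p (ufStep p x))) k (ufStep p (ufStep p x))) :=
          ⟨m', by omega, hmp ▸ hmr⟩
        have hInv' := halve_inv hInv hx
        obtain ⟨hI1, hI2, hI3, hI4⟩ := ih (p.insert x (ufStep p (ufStep p x))) (ufStep p (ufStep p x)) hInv' hwit
        have equivP : ∀ y r, RootsTo p y r ↔
            RootsTo (p.insert x (ufStep p (ufStep p x))) y r := by
          intro y r
          constructor
          · rintro ⟨n', hn', hr'⟩
            obtain ⟨m'', _, hmp'', hmr''⟩ := halve_fwd hInv hx n' y r hn' hr'
            exact ⟨m'', hmp'', hmr''⟩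
          · exact halve_bwd hInv hx y r
        rw [hred]
        refine ⟨hI1, ?_, ?_, ?_⟩
        · apply (equivP x _).mpr
          apply rootsTo_of_step
          rw [hstep']
          exact hI2
        · intro y r
          exact (equivP y r).trans (hI3 y r)
        · rw [hI4]
          exact PySem.Dict.keys_insert_of_contains p _ (contains_of_not_root hx)

theorem ufFind_spec (p : PySem.Dict String String) (x : String) (hInv : UFInv p) :
    UFInv (ufFind p x).2 ∧
    RootsTo p x (ufFind p x).1 ∧
    (∀ y r, RootsTo p y r ↔ RootsTo (ufFind p x).2 y r) ∧
    (ufFind p x).2.contains (ufFind p x).1 = true ∧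
    (∀ z, p.contains z = true → (ufFind p x).2.contains z = true) := by
  unfold ufFind
  by_cases hc : p.contains x = true
  · simp only [hc, if_true]
    obtain ⟨hI1, hI2, hI3, hI4⟩ := findLoop_spec p.size p x hInv (exists_root_le_size hInv x)
    refine ⟨hI1, hI2, hI3, ?_, ?_⟩
    · obtain ⟨n, hn, _⟩ := hI2
      have hcont : p.contains ((findLoop p.size p x).1) = true := by
        rw [← hn]; exact contains_piter hInv.2.1 hc n
      rw [PySem.Dict.contains_iff_mem_keys] at hcont ⊢
      rw [hI4]; exact hcont
    · intro z hz
      rw [PySem.Dict.contains_iff_mem_keys] at hz ⊢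
      rw [hI4]; exact hz
  · have hc' : p.contains x = false := by simpa using hc
    simp only [hc', Bool.false_eq_true, if_false]
    have hInv1 : UFInv (p.insert x x) := inv_insert_self hInv hc'
    have hc1 : (p.insert x x).contains x = true := by
      rw [PySem.Dict.contains_insert]; simp
    obtain ⟨hI1, hI2, hI3, hI4⟩ :=
      findLoop_spec (p.insert x x).size (p.insert x x) x hInv1 (exists_root_le_size hInv1 x)
    refine ⟨hI1, ?_, ?_, ?_, ?_⟩
    · exact (rootsTo_insert_self hc' x _).mp hI2
    · intro y r
      exact (rootsTo_insert_self hc' y r).symm.trans (hI3 y r)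
    · obtain ⟨n, hn, _⟩ := hI2
      have hcont : (p.insert x x).contains ((findLoop (p.insert x x).size (p.insert x x) x).1) = true := by
        rw [← hn]; exact contains_piter hInv1.2.1 hc1 n
      rw [PySem.Dict.contains_iff_mem_keys] at hcont ⊢
      rw [hI4]; exact hcont
    · intro z hz
      have hz1 : (p.insert x x).contains z = true := by
        rw [PySem.Dict.contains_insert, hz]; simp
      rw [PySem.Dict.contains_iff_mem_keys] at hz1 ⊢
      rw [hI4]; exact hz1

theorem sameRoot_trans {p : PySem.Dict String String} {x y z : String}
    (h1 : sameRoot p x y) (h2 : sameRoot p y z) : sameRoot p x z := by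
  obtain ⟨r, hx, hy⟩ := h1
  obtain ⟨r', hy', hz⟩ := h2
  exact ⟨r, hx, rootsTo_unique hy' hy ▸ hz⟩

theorem sameRoot_symm {p : PySem.Dict String String} {x y : String}
    (h : sameRoot p x y) : sameRoot p y x := by
  obtain ⟨r, hx, hy⟩ := h
  exact ⟨r, hy, hx⟩

theorem union_sameRoot {p2 : PySem.Dict String String} {a b ra rb : String}
    (hInv : UFInv p2) (hra : RootsTo p2 a ra) (hrb : RootsTo p2 b rb) (hne : ra ≠ rb) :
    ∀ x y, sameRoot (p2.insert ra rb) x y ↔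
      (sameRoot p2 x y ∨ (sameRoot p2 x a ∧ sameRoot p2 b y) ∨ (sameRoot p2 x b ∧ sameRoot p2 a y)) := by
  have hraRoot : IsRoot p2 ra := by obtain ⟨n, _, h⟩ := hra; exact h
  have hrbRoot : IsRoot p2 rb := by obtain ⟨n, _, h⟩ := hrb; exact h
  intro x y
  constructor
  · rintro ⟨r, h1, h2⟩
    rcases union_bwd hraRoot hrbRoot hne x r h1 with ⟨hx1, hx2⟩ | ⟨hx1, hx2⟩ <;>
      rcases union_bwd hraRoot hrbRoot hne y r h2 with ⟨hy1, hy2⟩ | ⟨hy1, hy2⟩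
    · exact Or.inl ⟨r, hx1, hy1⟩
    · subst hy2
      exact Or.inr (Or.inr ⟨⟨r, hx1, hrb⟩, ⟨ra, hra, hy1⟩⟩)
    · subst hx2
      exact Or.inr (Or.inl ⟨⟨ra, hx1, hra⟩, ⟨r, hrb, hy1⟩⟩)
    · exact Or.inl ⟨ra, hx1, hy1⟩
  · rintro (⟨r, hx, hy⟩ | ⟨⟨r1, hx, ha'⟩, ⟨r2, hb', hy⟩⟩ | ⟨⟨r1, hx, hb'⟩, ⟨r2, ha', hy⟩⟩)
    · by_cases hrra : r = ra
      · subst hrra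
        exact ⟨rb, union_fwd2 hraRoot hrbRoot hne x hx, union_fwd2 hraRoot hrbRoot hne y hy⟩
      · exact ⟨r, union_fwd1 hraRoot hrbRoot hne x r hx hrra,
          union_fwd1 hraRoot hrbRoot hne y r hy hrra⟩
    · have e1 : r1 = ra := rootsTo_unique ha' hra
      have e2 : r2 = rb := rootsTo_unique hb' hrb
      rw [e1] at hx; rw [e2] at hy
      exact ⟨rb, union_fwd2 hraRoot hrbRoot hne x hx,
        union_fwd1 hraRoot hrbRoot hne y rb hy (Ne.symm hne)⟩
    · have e1 : r1 = rb := rootsTo_unique hb' hrb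
      have e2 : r2 = ra := rootsTo_unique ha' hra
      rw [e1] at hx; rw [e2] at hy
      exact ⟨rb, union_fwd1 hraRoot hrbRoot hne x rb hx (Ne.symm hne),
        union_fwd2 hraRoot hrbRoot hne y hy⟩

theorem ufUnion_spec (p : PySem.Dict String String) (a b : String) (hInv : UFInv p) :
    UFInv (ufUnion p a b) ∧
    ∀ x y, sameRoot (ufUnion p a b) x y ↔
      (sameRoot p x y ∨ (sameRoot p x a ∧ sameRoot p b y) ∨ (sameRoot p x b ∧ sameRoot p a y)) := by
  obtain ⟨hA1, hA2, hA3, hA4, hA5⟩ := ufFind_spec p a hInv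
  obtain ⟨hB1, hB2, hB3, hB4, hB5⟩ := ufFind_spec (ufFind p a).2 b hA1
  have equivP : ∀ y r, RootsTo p y r ↔ RootsTo (ufFind (ufFind p a).2 b).2 y r :=
    fun y r => (hA3 y r).trans (hB3 y r)
  have hRa2 : RootsTo (ufFind (ufFind p a).2 b).2 a (ufFind p a).1 :=
    (hB3 _ _).mp ((hA3 _ _).mp hA2)
  have hRb2 : RootsTo (ufFind (ufFind p a).2 b).2 b (ufFind (ufFind p a).2 b).1 :=
    (hB3 _ _).mp hB2
  have hsrP : ∀ x y, sameRoot (ufFind (ufFind p a).2 b).2 x y ↔ sameRoot p x y := by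
    intro x y
    constructor
    · rintro ⟨r, h1, h2⟩; exact ⟨r, (equivP x r).mpr h1, (equivP y r).mpr h2⟩
    · rintro ⟨r, h1, h2⟩; exact ⟨r, (equivP x r).mp h1, (equivP y r).mp h2⟩
  have hsab : sameRoot p a b ↔ (ufFind p a).1 = (ufFind (ufFind p a).2 b).1 := by
    constructor
    · rintro ⟨r, h1, h2⟩
      have e1 : r = (ufFind p a).1 := rootsTo_unique h1 hA2
      have e2 : r = (ufFind (ufFind p a).2 b).1 :=
        rootsTo_unique ((equivP b r).mp h2) hRb2
      rw [← e1, ← e2]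
    · intro he
      exact ⟨(ufFind p a).1, hA2, (equivP b _).mpr (he ▸ hRb2)⟩
  unfold ufUnion
  by_cases hne : (ufFind p a).1 = (ufFind (ufFind p a).2 b).1
  · simp only [ne_eq, hne, not_true_eq_false, if_false]
    refine ⟨hB1, fun x y => (hsrP x y).trans ?_⟩
    have hab : sameRoot p a b := hsab.mpr hne
    constructor
    · exact Or.inl
    · rintro (h | ⟨h1, h2⟩ | ⟨h1, h2⟩)
      · exact h
      · exact sameRoot_trans (sameRoot_trans h1 hab) h2
      · exact sameRoot_trans (sameRoot_trans h1 (sameRoot_symm hab)) h2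
  · simp only [ne_eq, hne, not_false_eq_true, if_true]
    have hcra : (ufFind (ufFind p a).2 b).2.contains (ufFind p a).1 = true := hB5 _ hA4
    have hraRoot : IsRoot (ufFind (ufFind p a).2 b).2 (ufFind p a).1 := by
      obtain ⟨n, _, h⟩ := hRa2; exact h
    have hrbRoot : IsRoot (ufFind (ufFind p a).2 b).2 (ufFind (ufFind p a).2 b).1 := by
      obtain ⟨n, _, h⟩ := hRb2; exact h
    refine ⟨union_inv hB1 hraRoot hrbRoot hne hcra hB4, fun x y => ?_⟩
    rw [union_sameRoot hB1 hRa2 hRb2 hne x y]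
    constructor
    · rintro (h | ⟨h1, h2⟩ | ⟨h1, h2⟩)
      · exact Or.inl ((hsrP x y).mp h)
      · exact Or.inr (Or.inl ⟨(hsrP _ _).mp h1, (hsrP _ _).mp h2⟩)
      · exact Or.inr (Or.inr ⟨(hsrP _ _).mp h1, (hsrP _ _).mp h2⟩)
    · rintro (h | ⟨h1, h2⟩ | ⟨h1, h2⟩)
      · exact Or.inl ((hsrP x y).mpr h)
      · exact Or.inr (Or.inl ⟨(hsrP _ _).mpr h1, (hsrP _ _).mpr h2⟩)
      · exact Or.inr (Or.inr ⟨(hsrP _ _).mpr h1, (hsrP _ _).mpr h2⟩)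

-- ---- EqvGen bookkeeping ----
theorem eqvGen_congr {α : Type} {R S : α → α → Prop} (h : ∀ u v, R u v ↔ S u v) :
    ∀ x y, Relation.EqvGen R x y ↔ Relation.EqvGen S x y := by
  intro x y
  constructor
  · exact Relation.EqvGen.mono (fun u v huv => (h u v).mp huv)
  · exact Relation.EqvGen.mono (fun u v huv => (h u v).mpr huv)

theorem eqvGen_bot {α : Type} (x y : α) :
    Relation.EqvGen (fun _ _ => False) x y ↔ x = y := by
  constructor
  · intro h
    induction h with
    | rel _ _ h => exact absurd h id
    | refl _ => rfl
    | symm _ _ _ ih => exact ih.symm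
    | trans _ _ _ _ _ ih1 ih2 => exact ih1.trans ih2
  · rintro rfl
    exact Relation.EqvGen.refl x

theorem eqvGen_extend {α : Type} (R : α → α → Prop) (a b : α) : ∀ x y,
    Relation.EqvGen (fun u v => R u v ∨ (u = a ∧ v = b) ∨ (u = b ∧ v = a)) x y ↔
      (Relation.EqvGen R x y ∨
       (Relation.EqvGen R x a ∧ Relation.EqvGen R b y) ∨
       (Relation.EqvGen R x b ∧ Relation.EqvGen R a y)) := by
  intro x y
  constructor
  · intro h
    induction h with
    | rel u v h =>
      rcases h with h | ⟨rfl, rfl⟩ | ⟨rfl, rfl⟩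
      · exact Or.inl (Relation.EqvGen.rel u v h)
      · exact Or.inr (Or.inl ⟨Relation.EqvGen.refl u, Relation.EqvGen.refl v⟩)
      · exact Or.inr (Or.inr ⟨Relation.EqvGen.refl u, Relation.EqvGen.refl v⟩)
    | refl u => exact Or.inl (Relation.EqvGen.refl u)
    | symm u v _ ih =>
      rcases ih with h | ⟨h1, h2⟩ | ⟨h1, h2⟩
      · exact Or.inl (Relation.EqvGen.symm _ _ h)
      · exact Or.inr (Or.inr ⟨Relation.EqvGen.symm _ _ h2, Relation.EqvGen.symm _ _ h1⟩)
      · exact Or.inr (Or.inl ⟨Relation.EqvGen.symm _ _ h2, Relation.EqvGen.symm _ _ h1⟩)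
    | trans u v w _ _ ih1 ih2 =>
      have tr : ∀ {s t w : α}, Relation.EqvGen R s t → Relation.EqvGen R t w → Relation.EqvGen R s w :=
        fun h1 h2 => Relation.EqvGen.trans _ _ _ h1 h2
      rcases ih1 with h | ⟨h1, h2⟩ | ⟨h1, h2⟩ <;>
        rcases ih2 with h' | ⟨h1', h2'⟩ | ⟨h1', h2'⟩
      · exact Or.inl (tr h h')
      · exact Or.inr (Or.inl ⟨tr h h1', h2'⟩)
      · exact Or.inr (Or.inr ⟨tr h h1', h2'⟩)
      · exact Or.inr (Or.inl ⟨h1, tr h2 h'⟩)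
      · exact Or.inr (Or.inl ⟨h1, h2'⟩)
      · exact Or.inl (tr h1 h2')
      · exact Or.inr (Or.inr ⟨h1, tr h2 h'⟩)
      · exact Or.inl (tr h1 h2')
      · exact Or.inr (Or.inr ⟨h1, h2'⟩)
  · have hmono : ∀ u v, Relation.EqvGen R u v →
        Relation.EqvGen (fun u v => R u v ∨ (u = a ∧ v = b) ∨ (u = b ∧ v = a)) u v :=
      fun u v h => Relation.EqvGen.mono (fun s t hst => Or.inl hst) h
    have hab : Relation.EqvGen (fun u v => R u v ∨ (u = a ∧ v = b) ∨ (u = b ∧ v = a)) a b :=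
      Relation.EqvGen.rel a b (Or.inr (Or.inl ⟨rfl, rfl⟩))
    rintro (h | ⟨h1, h2⟩ | ⟨h1, h2⟩)
    · exact hmono _ _ h
    · exact Relation.EqvGen.trans _ _ _ (Relation.EqvGen.trans _ _ _ (hmono _ _ h1) hab) (hmono _ _ h2)
    · exact Relation.EqvGen.trans _ _ _
        (Relation.EqvGen.trans _ _ _ (hmono _ _ h1) (Relation.EqvGen.symm _ _ hab)) (hmono _ _ h2)

def pairRel (ps : List (String × String)) (x y : String) : Prop :=
  (x, y) ∈ ps ∨ (y, x) ∈ ps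

-- ---- phase 1, A side ----
theorem pairRel_cons (a b : String) (ps : List (String × String)) (u v : String) :
    pairRel ((a, b) :: ps) u v ↔ ((u = a ∧ v = b) ∨ (u = b ∧ v = a)) ∨ pairRel ps u v := by
  simp only [pairRel, List.mem_cons, Prod.ext_iff]
  tauto

theorem phase1A_spec : ∀ (ps : List (String × String)) (p : PySem.Dict String String)
    (R : String → String → Prop),
    UFInv p → (∀ x y, sameRoot p x y ↔ Relation.EqvGen R x y) →
    UFInv (ps.foldl (fun p ab => ufUnion p ab.1 ab.2) p) ∧
    ∀ x y, sameRoot (ps.foldl (fun p ab => ufUnion p ab.1 ab.2) p) x y ↔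
      Relation.EqvGen (fun u v => R u v ∨ pairRel ps u v) x y := by
  intro ps
  induction ps with
  | nil =>
    intro p R hInv hiff
    refine ⟨hInv, fun x y => (hiff x y).trans (eqvGen_congr (fun u v => ?_) x y)⟩
    simp [pairRel]
  | cons ab ps ih =>
    intro p R hInv hiff
    obtain ⟨a, b⟩ := ab
    obtain ⟨hU1, hU2⟩ := ufUnion_spec p a b hInv
    have hstep : ∀ x y, sameRoot (ufUnion p a b) x y ↔
        Relation.EqvGen (fun u v => R u v ∨ (u = a ∧ v = b) ∨ (u = b ∧ v = a)) x y := by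
      intro x y
      rw [hU2 x y, eqvGen_extend, hiff, hiff, hiff, hiff, hiff]
    obtain ⟨hF1, hF2⟩ := ih (ufUnion p a b) _ hU1 hstep
    refine ⟨hF1, fun x y => (hF2 x y).trans (eqvGen_congr (fun u v => ?_) x y)⟩
    rw [pairRel_cons]
    tauto

-- ---- phase 1, B side ----
def labRel (comp : PySem.Dict String Int) (x y : String) : Prop :=
  x = y ∨ ∃ l, comp.get? x = some l ∧ comp.get? y = some l

def LabBound (comp : PySem.Dict String Int) (nl : Int) : Prop :=
  ∀ x l, comp.get? x = some l → l < nl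

theorem mergeLabels_get? (comp : PySem.Dict String Int) (la lb : Int) (z : String) :
    (mergeLabels comp la lb).get? z = (comp.get? z).map (fun v => if v = lb then la else v) := by
  obtain ⟨L⟩ := comp
  unfold mergeLabels
  induction L with
  | nil => rfl
  | cons kv rest ih =>
    obtain ⟨k, v⟩ := kv
    simp only [List.map_cons, PySem.Dict.get?_mk_cons]
    by_cases hk : (k == z) = true
    · simp [hk, beq_iff_eq]
    · simpa [hk] using ih

theorem labRel_refl (comp : PySem.Dict String Int) (x : String) : labRel comp x x := Or.inl rfl

theorem labRel_symm {comp : PySem.Dict String Int} {x y : String}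
    (h : labRel comp x y) : labRel comp y x := by
  rcases h with rfl | ⟨l, h1, h2⟩
  · exact Or.inl rfl
  · exact Or.inr ⟨l, h2, h1⟩

theorem labRel_trans {comp : PySem.Dict String Int} {x y z : String}
    (h1 : labRel comp x y) (h2 : labRel comp y z) : labRel comp x z := by
  rcases h1 with rfl | ⟨l, ha, hb⟩
  · exact h2
  · rcases h2 with rfl | ⟨l', hc, hd⟩
    · exact Or.inr ⟨l, ha, hb⟩
    · rw [hb] at hc
      exact Or.inr ⟨l, ha, (Option.some.injEq _ _ ▸ hc : l = l') ▸ hd⟩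

theorem labRel_none_right {comp : PySem.Dict String Int} {a : String}
    (h : comp.get? a = none) (x : String) : labRel comp x a ↔ x = a := by
  constructor
  · rintro (rfl | ⟨l, _, h2⟩)
    · rfl
    · rw [h] at h2; exact absurd h2 (by simp)
  · rintro rfl; exact labRel_refl comp x

theorem labRel_none_left {comp : PySem.Dict String Int} {a : String}
    (h : comp.get? a = none) (y : String) : labRel comp a y ↔ a = y := by
  constructor
  · intro hl; exact ((labRel_none_right h y).mp (labRel_symm hl)).symm
  · rintro rfl; exact labRel_refl comp a

theorem labRel_some_right {comp : PySem.Dict String Int} {a : String} {la : Int}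
    (h : comp.get? a = some la) (x : String) : labRel comp x a ↔ comp.get? x = some la := by
  constructor
  · rintro (rfl | ⟨l, h1, h2⟩)
    · exact h
    · rw [h] at h2
      injection h2 with e
      rw [h1, ← e]
  · intro hx; exact Or.inr ⟨la, hx, h⟩

theorem labRel_some_left {comp : PySem.Dict String Int} {a : String} {la : Int}
    (h : comp.get? a = some la) (y : String) : labRel comp a y ↔ comp.get? y = some la := by
  constructor
  · intro hl; exact (labRel_some_right h y).mp (labRel_symm hl)
  · intro hy; exact labRel_symm ((labRel_some_right h y).mpr hy)

theorem addPairB_spec (comp : PySem.Dict String Int) (nl : Int) (a b : String)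
    (hB : LabBound comp nl) :
    LabBound (addPairB (comp, nl) (a, b)).1 (addPairB (comp, nl) (a, b)).2 ∧
    ∀ x y, labRel (addPairB (comp, nl) (a, b)).1 x y ↔
      (labRel comp x y ∨ (labRel comp x a ∧ labRel comp b y) ∨
       (labRel comp x b ∧ labRel comp a y)) := by
  rcases ha : comp.get? a with _ | la <;> rcases hb : comp.get? b with _ | lb
  · -- none none: fresh component
    simp only [addPairB, ha, hb]
    have get' : ∀ z, ((comp.insert a nl).insert b nl).get? z =
        if z = b then some nl else if z = a then some nl else comp.get? z := by
      intro z
      rw [PySem.Dict.get?_insert, PySem.Dict.get?_insert]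
    constructor
    · intro z l hz
      rw [get'] at hz
      split_ifs at hz with h1 h2
      · cases hz; omega
      · cases hz; omega
      · have := hB z l hz; omega
    · intro x y
      constructor
      · rintro (rfl | ⟨l, hx, hy⟩)
        · exact Or.inl (labRel_refl comp x)
        · by_cases hl : l = nl
          · subst hl
            have hx' : x = b ∨ x = a := by
              rw [get'] at hx
              split_ifs at hx with h1 h2
              · exact Or.inl h1
              · exact Or.inr h2
              · exact absurd (hB x l hx) (lt_irrefl l)
            have hy' : y = b ∨ y = a := by
              rw [get'] at hy
              split_ifs at hy with h1 h2
              · exact Or.inl h1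
              · exact Or.inr h2
              · exact absurd (hB y l hy) (lt_irrefl l)
            rcases hx' with h | h <;> rcases hy' with h' | h'
            · exact Or.inl (Or.inl (h.trans h'.symm))
            · exact Or.inr (Or.inr ⟨Or.inl h, Or.inl h'.symm⟩)
            · exact Or.inr (Or.inl ⟨Or.inl h, Or.inl h'.symm⟩)
            · exact Or.inl (Or.inl (h.trans h'.symm))
          · have hx' : comp.get? x = some l := by
              rw [get'] at hx
              split_ifs at hx with h1 h2
              · exact absurd (Option.some.inj hx) (fun e => hl e.symm)
              · exact absurd (Option.some.inj hx) (fun e => hl e.symm)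
              · exact hx
            have hy' : comp.get? y = some l := by
              rw [get'] at hy
              split_ifs at hy with h1 h2
              · exact absurd (Option.some.inj hy) (fun e => hl e.symm)
              · exact absurd (Option.some.inj hy) (fun e => hl e.symm)
              · exact hy
            exact Or.inl (Or.inr ⟨l, hx', hy'⟩)
      · have hxa : ∀ z l, comp.get? z = some l → z ≠ a := by
          rintro z l hz rfl; rw [ha] at hz; exact absurd hz (by simp)
        have hxb : ∀ z l, comp.get? z = some l → z ≠ b := by
          rintro z l hz rfl; rw [hb] at hz; exact absurd hz (by simp)
        rintro (h | ⟨h1, h2⟩ | ⟨h1, h2⟩)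
        · rcases h with rfl | ⟨l, hx, hy⟩
          · exact labRel_refl _ x
          · refine Or.inr ⟨l, ?_, ?_⟩
            · rw [get', if_neg (hxb x l hx), if_neg (hxa x l hx)]; exact hx
            · rw [get', if_neg (hxb y l hy), if_neg (hxa y l hy)]; exact hy
        · rw [labRel_none_right ha] at h1
          rw [labRel_none_left hb] at h2
          subst h1; subst h2
          refine Or.inr ⟨nl, by rw [get']; split_ifs with hh1 hh2 <;> first | rfl | exact absurd rfl hh2, by rw [get', if_pos rfl]⟩
        · rw [labRel_none_right hb] at h1
          rw [labRel_none_left ha] at h2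
          subst h1; subst h2
          refine Or.inr ⟨nl, by rw [get', if_pos rfl], by rw [get']; split_ifs with hh1 hh2 <;> first | rfl | exact absurd rfl hh2⟩
  · -- a fresh, b labelled lb
    simp only [addPairB, ha, hb]
    have get' : ∀ z, (comp.insert a lb).get? z = if z = a then some lb else comp.get? z := by
      intro z; rw [PySem.Dict.get?_insert]
    constructor
    · intro z l hz
      rw [get'] at hz
      split_ifs at hz
      · cases hz; exact hB b lb hb
      · exact hB z l hz
    · intro x y
      constructor
      · rintro (rfl | ⟨l, hx, hy⟩)
        · exact Or.inl (labRel_refl comp x)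
        · rw [get'] at hx hy
          by_cases h1 : x = a <;> by_cases h2 : y = a
          · exact Or.inl (Or.inl (h1.trans h2.symm))
          · rw [if_pos h1] at hx
            rw [if_neg h2] at hy
            injection hx with e
            subst e
            exact Or.inr (Or.inl ⟨Or.inl h1, (labRel_some_left hb y).mpr hy⟩)
          · rw [if_neg h1] at hx
            rw [if_pos h2] at hy
            injection hy with e
            subst e
            exact Or.inr (Or.inr ⟨(labRel_some_right hb x).mpr hx, Or.inl h2.symm⟩)
          · rw [if_neg h1] at hx
            rw [if_neg h2] at hy
            exact Or.inl (Or.inr ⟨l, hx, hy⟩)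
      · have hza : ∀ z l, comp.get? z = some l → z ≠ a := by
          rintro z l hz rfl; rw [ha] at hz; exact absurd hz (by simp)
        rintro (h | ⟨h1, h2⟩ | ⟨h1, h2⟩)
        · rcases h with rfl | ⟨l, hx, hy⟩
          · exact labRel_refl _ x
          · exact Or.inr ⟨l, by rw [get', if_neg (hza x l hx)]; exact hx,
              by rw [get', if_neg (hza y l hy)]; exact hy⟩
        · rw [labRel_none_right ha] at h1
          rw [labRel_some_left hb] at h2
          subst h1
          refine Or.inr ⟨lb, by rw [get', if_pos rfl], ?_⟩
          rw [get']
          split_ifs with h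
          · rfl
          · exact h2
        · rw [labRel_some_right hb] at h1
          rw [labRel_none_left ha] at h2
          refine Or.inr ⟨lb, ?_, by rw [get', if_pos h2.symm]⟩
          rw [get']
          split_ifs with h
          · rfl
          · exact h1
  · -- b fresh, a labelled la
    simp only [addPairB, ha, hb]
    have get' : ∀ z, (comp.insert b la).get? z = if z = b then some la else comp.get? z := by
      intro z; rw [PySem.Dict.get?_insert]
    constructor
    · intro z l hz
      rw [get'] at hz
      split_ifs at hz
      · cases hz; exact hB a la ha
      · exact hB z l hz
    · intro x y
      constructor
      · rintro (rfl | ⟨l, hx, hy⟩)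
        · exact Or.inl (labRel_refl comp x)
        · rw [get'] at hx hy
          by_cases h1 : x = b <;> by_cases h2 : y = b
          · exact Or.inl (Or.inl (h1.trans h2.symm))
          · rw [if_pos h1] at hx
            rw [if_neg h2] at hy
            injection hx with e
            subst e
            exact Or.inr (Or.inr ⟨Or.inl h1, (labRel_some_left ha y).mpr hy⟩)
          · rw [if_neg h1] at hx
            rw [if_pos h2] at hy
            injection hy with e
            subst e
            exact Or.inr (Or.inl ⟨(labRel_some_right ha x).mpr hx, Or.inl h2.symm⟩)
          · rw [if_neg h1] at hx
            rw [if_neg h2] at hy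
            exact Or.inl (Or.inr ⟨l, hx, hy⟩)
      · have hzb : ∀ z l, comp.get? z = some l → z ≠ b := by
          rintro z l hz rfl; rw [hb] at hz; exact absurd hz (by simp)
        rintro (h | ⟨h1, h2⟩ | ⟨h1, h2⟩)
        · rcases h with rfl | ⟨l, hx, hy⟩
          · exact labRel_refl _ x
          · exact Or.inr ⟨l, by rw [get', if_neg (hzb x l hx)]; exact hx,
              by rw [get', if_neg (hzb y l hy)]; exact hy⟩
        · rw [labRel_some_right ha] at h1
          rw [labRel_none_left hb] at h2
          refine Or.inr ⟨la, ?_, by rw [get', if_pos h2.symm]⟩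
          rw [get']
          split_ifs with h
          · rfl
          · exact h1
        · rw [labRel_none_right hb] at h1
          rw [labRel_some_left ha] at h2
          subst h1
          refine Or.inr ⟨la, by rw [get', if_pos rfl], ?_⟩
          rw [get']
          split_ifs with h
          · rfl
          · exact h2
  · -- both labelled
    simp only [addPairB, ha, hb]
    by_cases hne : la = lb
    · subst hne
      simp only [ne_eq, not_true_eq_false, if_false]
      have hab : labRel comp a b := Or.inr ⟨la, ha, hb⟩
      refine ⟨hB, fun x y => ?_⟩
      constructor
      · exact Or.inl
      · rintro (h | ⟨h1, h2⟩ | ⟨h1, h2⟩)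
        · exact h
        · exact labRel_trans (labRel_trans h1 hab) h2
        · exact labRel_trans (labRel_trans h1 (labRel_symm hab)) h2
    · simp only [ne_eq, hne, not_false_eq_true, if_true]
      have get' := mergeLabels_get? comp la lb
      constructor
      · intro z l hz
        rw [get'] at hz
        rcases Option.map_eq_some_iff.mp hz with ⟨u, hu, hfu⟩
        split_ifs at hfu
        · subst hfu; exact hB a la ha
        · subst hfu; exact hB z u hu
      · intro x y
        constructor
        · rintro (rfl | ⟨l, hx, hy⟩)
          · exact Or.inl (labRel_refl comp x)
          · rw [get'] at hx hy
            rcases Option.map_eq_some_iff.mp hx with ⟨u, hu, hfu⟩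
            rcases Option.map_eq_some_iff.mp hy with ⟨v, hv, hfv⟩
            have hfe : (if u = lb then la else u) = (if v = lb then la else v) := by
              rw [hfu, hfv]
            split_ifs at hfe with h1 h2 h3
            · exact Or.inl (Or.inr ⟨u, hu, by rw [hv, h2, ← h1]⟩)
            · exact Or.inr (Or.inr ⟨(labRel_some_right hb x).mpr (by rw [hu, h1]),
                (labRel_some_left ha y).mpr (by rw [hv, ← hfe])⟩)
            · exact Or.inr (Or.inl ⟨(labRel_some_right ha x).mpr (by rw [hu, hfe]),
                (labRel_some_left hb y).mpr (by rw [hv, h3])⟩)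
            · exact Or.inl (Or.inr ⟨u, hu, by rw [hv, ← hfe]⟩)
        · have hmap : ∀ z u, comp.get? z = some u →
              (mergeLabels comp la lb).get? z = some (if u = lb then la else u) := by
            intro z u hu
            rw [get', hu]; rfl
          rintro (h | ⟨h1, h2⟩ | ⟨h1, h2⟩)
          · rcases h with rfl | ⟨l, hx, hy⟩
            · exact labRel_refl _ x
            · exact Or.inr ⟨if l = lb then la else l, hmap x l hx, hmap y l hy⟩
          · rw [labRel_some_right ha] at h1
            rw [labRel_some_left hb] at h2
            refine Or.inr ⟨la, ?_, ?_⟩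
            · rw [hmap x la h1]; simp [hne]
            · rw [hmap y lb h2]; simp
          · rw [labRel_some_right hb] at h1
            rw [labRel_some_left ha] at h2
            refine Or.inr ⟨la, ?_, ?_⟩
            · rw [hmap x lb h1]; simp
            · rw [hmap y la h2]; simp [hne]

theorem phase1B_spec : ∀ (ps : List (String × String)) (comp : PySem.Dict String Int) (nl : Int)
    (R : String → String → Prop),
    LabBound comp nl → (∀ x y, labRel comp x y ↔ Relation.EqvGen R x y) →
    LabBound (ps.foldl addPairB (comp, nl)).1 (ps.foldl addPairB (comp, nl)).2 ∧
    ∀ x y, labRel (ps.foldl addPairB (comp, nl)).1 x y ↔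
      Relation.EqvGen (fun u v => R u v ∨ pairRel ps u v) x y := by
  intro ps
  induction ps with
  | nil =>
    intro comp nl R hB hiff
    refine ⟨hB, fun x y => (hiff x y).trans (eqvGen_congr (fun u v => ?_) x y)⟩
    simp [pairRel]
  | cons ab ps ih =>
    intro comp nl R hB hiff
    obtain ⟨a, b⟩ := ab
    obtain ⟨hS1, hS2⟩ := addPairB_spec comp nl a b hB
    have hstep : ∀ x y, labRel (addPairB (comp, nl) (a, b)).1 x y ↔
        Relation.EqvGen (fun u v => R u v ∨ (u = a ∧ v = b) ∨ (u = b ∧ v = a)) x y := by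
      intro x y
      rw [hS2 x y, eqvGen_extend, hiff, hiff, hiff, hiff, hiff]
    have hfold : ((a, b) :: ps).foldl addPairB (comp, nl) =
        ps.foldl addPairB ((addPairB (comp, nl) (a, b)).1, (addPairB (comp, nl) (a, b)).2) := by
      simp [List.foldl_cons]
    rw [hfold]
    obtain ⟨hF1, hF2⟩ := ih (addPairB (comp, nl) (a, b)).1 (addPairB (comp, nl) (a, b)).2 _ hS1 hstep
    refine ⟨hF1, fun x y => (hF2 x y).trans (eqvGen_congr (fun u v => ?_) x y)⟩
    rw [pairRel_cons]
    tauto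

theorem addPairB_contains (comp : PySem.Dict String Int) (nl : Int) (a b z : String) :
    (addPairB (comp, nl) (a, b)).1.contains z = true ↔
      comp.contains z = true ∨ z = a ∨ z = b := by
  rcases ha : comp.get? a with _ | la <;> rcases hb : comp.get? b with _ | lb <;>
    simp only [addPairB, ha, hb]
  · simp only [PySem.Dict.contains_insert, Bool.or_eq_true, beq_iff_eq]
    tauto
  · have hcb : comp.contains b = true := by
      rw [PySem.Dict.contains_eq_isSome_get?, hb]; rfl
    simp only [PySem.Dict.contains_insert, Bool.or_eq_true, beq_iff_eq]
    constructor
    · rintro (h | h)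
      · exact Or.inr (Or.inl h)
      · exact Or.inl h
    · rintro (h | h | rfl)
      · exact Or.inr h
      · exact Or.inl h
      · exact Or.inr hcb
  · have hca : comp.contains a = true := by
      rw [PySem.Dict.contains_eq_isSome_get?, ha]; rfl
    simp only [PySem.Dict.contains_insert, Bool.or_eq_true, beq_iff_eq]
    constructor
    · rintro (h | h)
      · exact Or.inr (Or.inr h)
      · exact Or.inl h
    · rintro (h | rfl | h)
      · exact Or.inr h
      · exact Or.inr hca
      · exact Or.inl h
  · have hca : comp.contains a = true := by
      rw [PySem.Dict.contains_eq_isSome_get?, ha]; rfl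
    have hcb : comp.contains b = true := by
      rw [PySem.Dict.contains_eq_isSome_get?, hb]; rfl
    have hmc : ∀ w, (mergeLabels comp la lb).contains w = comp.contains w := by
      intro w
      rw [PySem.Dict.contains_eq_isSome_get?, PySem.Dict.contains_eq_isSome_get?,
        mergeLabels_get?]
      cases comp.get? w <;> rfl
    by_cases hne : la = lb
    · simp only [ne_eq, hne, not_true_eq_false, if_false]
      constructor
      · exact Or.inl
      · rintro (h | rfl | rfl)
        · exact h
        · exact hca
        · exact hcb
    · simp only [ne_eq, hne, not_false_eq_true, if_true, hmc]
      constructor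
      · exact Or.inl
      · rintro (h | rfl | rfl)
        · exact h
        · exact hca
        · exact hcb

theorem phase1B_contains : ∀ (ps : List (String × String)) (comp : PySem.Dict String Int) (nl : Int) (z : String),
    (ps.foldl addPairB (comp, nl)).1.contains z = true ↔
      comp.contains z = true ∨ z ∈ ps.flatMap (fun ab => [ab.1, ab.2]) := by
  intro ps
  induction ps with
  | nil => intro comp nl z; simp
  | cons ab ps ih =>
    intro comp nl z
    obtain ⟨a, b⟩ := ab
    have hfold : ((a, b) :: ps).foldl addPairB (comp, nl) =
        ps.foldl addPairB ((addPairB (comp, nl) (a, b)).1, (addPairB (comp, nl) (a, b)).2) := by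
      simp [List.foldl_cons]
    rw [hfold, ih, addPairB_contains]
    simp only [List.flatMap_cons, List.mem_append, List.mem_cons,
      List.not_mem_nil, or_false]
    tauto

-- ---- phase 2 simulation ----
theorem foldl_pairs_flat {σ : Type} (ps : List (String × String)) (f : σ → String → σ) (s : σ) :
    ps.foldl (fun st ab => f (f st ab.1) ab.2) s = (ps.flatMap (fun ab => [ab.1, ab.2])).foldl f s := by
  induction ps generalizing s with
  | nil => rfl
  | cons ab ps ih => simp [List.foldl_cons, List.flatMap_cons, List.foldl_append, ih]

theorem phase2_sim (comp : PySem.Dict String Int) :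
    ∀ (L : List String) (pA : PySem.Dict String String) (roots : PySem.Dict String Int)
      (groups : PySem.Dict Int Int) (c : Int) (res : PySem.Dict String Int),
    UFInv pA → (∀ x y, sameRoot pA x y ↔ labRel comp x y) →
    (∀ k ∈ L, comp.contains k = true) →
    (∀ k r l, RootsTo pA k r → comp.get? k = some l → roots.get? r = groups.get? l) →
    (L.foldl phase2A (pA, roots, c, res)).2.2.2 = (L.foldl (phase2B comp) (groups, c, res)).2.2 := by
  intro L
  induction L with
  | nil => intro pA roots groups c res _ _ _ _; rfl
  | cons k L ihL =>
    intro pA roots groups c res hInv hpart hin hcorr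
    simp only [List.foldl_cons]
    by_cases hres : res.contains k = true
    · have e1 : phase2A (pA, roots, c, res) k = (pA, roots, c, res) := by
        simp [phase2A, hres]
      have e2 : phase2B comp (groups, c, res) k = (groups, c, res) := by
        simp [phase2B, hres]
      rw [e1, e2]
      exact ihL pA roots groups c res hInv hpart (fun k' hk' => hin k' (List.mem_cons_of_mem _ hk')) hcorr
    · have hresf : res.contains k = false := by simpa using hres
      obtain ⟨hF1, hF2, hF3, hF4, hF5⟩ := ufFind_spec pA k hInv
      have hkc : comp.contains k = true := hin k (List.mem_cons_self)
      have hks : (comp.get? k).isSome := by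
        rw [← PySem.Dict.contains_eq_isSome_get?]; exact hkc
      obtain ⟨l, hl⟩ := Option.isSome_iff_exists.mp hks
      have hlab : comp.getD k 0 = l := PySem.Dict.getD_of_get?_eq_some comp 0 hl
      have hcor := hcorr k (ufFind pA k).1 l hF2 hl
      have hpart' : ∀ x y, sameRoot (ufFind pA k).2 x y ↔ labRel comp x y := by
        intro x y
        rw [← hpart x y]
        constructor
        · rintro ⟨r, h1, h2⟩; exact ⟨r, (hF3 x r).mpr h1, (hF3 y r).mpr h2⟩
        · rintro ⟨r, h1, h2⟩; exact ⟨r, (hF3 x r).mp h1, (hF3 y r).mp h2⟩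
      have hin' : ∀ k' ∈ L, comp.contains k' = true :=
        fun k' hk' => hin k' (List.mem_cons_of_mem _ hk')
      by_cases hrt : roots.contains (ufFind pA k).1 = true
      · have hgt : groups.contains l = true := by
          rw [PySem.Dict.contains_eq_isSome_get?, ← hcor,
            ← PySem.Dict.contains_eq_isSome_get?]
          exact hrt
        have e1 : phase2A (pA, roots, c, res) k =
            ((ufFind pA k).2, roots, c, res.insert k (roots.getD (ufFind pA k).1 0)) := by
          simp [phase2A, hresf, hrt]
        have e2 : phase2B comp (groups, c, res) k =
            (groups, c, res.insert k (groups.getD l 0)) := by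
          simp [phase2B, hresf, hlab, hgt]
        have hval : roots.getD (ufFind pA k).1 0 = groups.getD l 0 := by
          rw [PySem.Dict.getD_eq_get?_getD, PySem.Dict.getD_eq_get?_getD, hcor]
        rw [e1, e2, hval]
        exact ihL (ufFind pA k).2 roots groups c _ hF1 hpart' hin'
          (fun k' r' l' hr' hl' => hcorr k' r' l' ((hF3 k' r').mpr hr') hl')
      · have hgf : groups.get? l = none := by
          rw [← hcor, PySem.Dict.get?_eq_none_iff_contains]
          simpa using hrt
        have hgtf : groups.contains l = false := by
          rw [← PySem.Dict.get?_eq_none_iff_contains]; exact hgf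
        have e1 : phase2A (pA, roots, c, res) k =
            ((ufFind pA k).2, roots.insert (ufFind pA k).1 c, c + 1,
              res.insert k ((roots.insert (ufFind pA k).1 c).getD (ufFind pA k).1 0)) := by
          simp [phase2A, hresf, hrt]
        have e2 : phase2B comp (groups, c, res) k =
            (groups.insert l c, c + 1, res.insert k ((groups.insert l c).getD l 0)) := by
          simp [phase2B, hresf, hlab, hgtf]
        have hv1 : (roots.insert (ufFind pA k).1 c).getD (ufFind pA k).1 0 = c :=
          PySem.Dict.getD_insert_self roots _ c 0
        have hv2 : (groups.insert l c).getD l 0 = c :=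
          PySem.Dict.getD_insert_self groups l c 0
        rw [e1, e2, hv1, hv2]
        refine ihL (ufFind pA k).2 (roots.insert (ufFind pA k).1 c) (groups.insert l c)
          (c + 1) _ hF1 hpart' hin' ?_
        intro k' r' l' hr' hl'
        have hrA : RootsTo pA k' r' := (hF3 k' r').mpr hr'
        have hiff2 : r' = (ufFind pA k).1 ↔ l' = l := by
          constructor
          · intro he
            have hsr : sameRoot pA k' k := ⟨(ufFind pA k).1, he ▸ hrA, hF2⟩
            rcases (hpart k' k).mp hsr with rfl | ⟨m, h1, h2⟩
            · rw [hl] at hl'; exact (Option.some.inj hl').symm ▸ rfl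
            · rw [hl'] at h1
              rw [hl] at h2
              rw [Option.some.inj h1, ← Option.some.inj h2]
          · intro he
            have hlr : labRel comp k' k := Or.inr ⟨l, he ▸ hl', hl⟩
            obtain ⟨r, h1, h2⟩ := (hpart k' k).mpr hlr
            rw [← rootsTo_unique h1 hrA, rootsTo_unique h2 hF2]
        rw [PySem.Dict.get?_insert, PySem.Dict.get?_insert]
        by_cases he : r' = (ufFind pA k).1
        · rw [if_pos he, if_pos (hiff2.mp he)]
        · rw [if_neg he, if_neg (fun h => he (hiff2.mpr h))]
          exact hcorr k' r' l' hrA hl'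

theorem ufStep_empty (y : String) : ufStep (PySem.Dict.empty : PySem.Dict String String) y = y :=
  PySem.Dict.getD_of_not_contains _ y (by rw [PySem.Dict.contains_empty])

theorem rootsTo_empty (y r : String) :
    RootsTo (PySem.Dict.empty : PySem.Dict String String) y r ↔ y = r := by
  constructor
  · rintro ⟨n, hn, _⟩
    rw [root_piter _ (ufStep_empty y) n] at hn
    exact hn
  · rintro rfl
    exact ⟨0, rfl, ufStep_empty y⟩

theorem inv_empty : UFInv (PySem.Dict.empty : PySem.Dict String String) := by
  refine ⟨by simp [PySem.Dict.keys, PySem.Dict.empty], ?_, ?_⟩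
  · intro kv hkv
    simp [PySem.Dict.empty] at hkv
  · intro y
    exact ⟨y, (rootsTo_empty y y).mpr rfl⟩

-- ===== VERDICT (by name: the statement is the Claim_ definition above) =====
set_option maxHeartbeats 1000000 in
theorem compute_groups_py_spec : Claim_equal_compute_groups_py := by
  unfold Claim_equal_compute_groups_py Spec_compute_groups_py
  intro pairs _
  simp only [compute_groups_py, compute_groups_py_alt]
  have hsrE : ∀ x y, sameRoot (PySem.Dict.empty : PySem.Dict String String) x y ↔
      Relation.EqvGen (fun _ _ => False) x y := by
    intro x y
    rw [eqvGen_bot]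
    constructor
    · rintro ⟨r, h1, h2⟩
      rw [(rootsTo_empty x r).mp h1, (rootsTo_empty y r).mp h2]
    · rintro rfl
      exact ⟨x, (rootsTo_empty x x).mpr rfl, (rootsTo_empty x x).mpr rfl⟩
  have hlabE : ∀ x y, labRel (PySem.Dict.empty : PySem.Dict String Int) x y ↔
      Relation.EqvGen (fun _ _ => False) x y := by
    intro x y
    rw [eqvGen_bot]
    constructor
    · rintro (rfl | ⟨l, h1, _⟩)
      · rfl
      · rw [PySem.Dict.get?_empty] at h1
        exact absurd h1 (by simp)
    · rintro rfl
      exact labRel_refl _ x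
  obtain ⟨hInvF, hsrF⟩ := phase1A_spec pairs PySem.Dict.empty (fun _ _ => False) inv_empty hsrE
  obtain ⟨_, hlabF⟩ := phase1B_spec pairs PySem.Dict.empty 0 (fun _ _ => False)
    (fun x l h => by rw [PySem.Dict.get?_empty] at h; exact absurd h (by simp)) hlabE
  have hpart : ∀ x y,
      sameRoot (pairs.foldl (fun p ab => ufUnion p ab.1 ab.2) PySem.Dict.empty) x y ↔
        labRel (pairs.foldl addPairB (PySem.Dict.empty, 0)).1 x y :=
    fun x y => (hsrF x y).trans ((hlabF x y).symm)
  have hin : ∀ k ∈ pairs.flatMap (fun ab => [ab.1, ab.2]),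
      (pairs.foldl addPairB (PySem.Dict.empty, 0)).1.contains k = true := by
    intro k hk
    rw [phase1B_contains]
    exact Or.inr hk
  have hcorr0 : ∀ (k : String) (r : String) (l : Int),
      RootsTo (pairs.foldl (fun p ab => ufUnion p ab.1 ab.2) PySem.Dict.empty) k r →
      (pairs.foldl addPairB (PySem.Dict.empty, 0)).1.get? k = some l →
      (PySem.Dict.empty : PySem.Dict String Int).get? r =
        (PySem.Dict.empty : PySem.Dict Int Int).get? l := by
    intro k r l _ _
    rw [PySem.Dict.get?_empty, PySem.Dict.get?_empty]
  have hsim := phase2_sim _ _ _ _ _ 1 PySem.Dict.empty hInvF hpart hin hcorr0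
  rw [foldl_pairs_flat pairs phase2A _]
  rw [hsim]
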